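-- pv_equiv track=rewrite | github.com/HyosungSink/OSKernel2026-T202610486999572 | tools/run_full_local_suite.py | ltp_shard_completed_and_stalled_cases
-- ===== SOURCE A (Python) =====
-- def find_line_index(lines: list[str], needle: str, start: int = 0) -> int:
--     for index in range(start, len(lines)):
--         if lines[index] == needle:
--             return index
--     return -1
--
-- def find_line_with_prefix(lines: list[str], prefix: str, start: int = 0) -> int:
--     for index in range(start, len(lines)):
--         if lines[index].startswith(prefix):
--             return index
--     return -1
--
-- def ltp_shard_completed_and_stalled_cases(
--     lines: list[str],
--     cases: list[str],
-- ) -> tuple[list[str], str | None]: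
--     completed: list[str] = []
--     pos = 0
--     for name in cases:
--         run_idx = find_line_index(lines, f"RUN LTP CASE {name}", pos)
--         if run_idx < 0:
--             break
--         search_pos = run_idx + 1
--         fail_idx = find_line_with_prefix(lines, f"FAIL LTP CASE {name} : ", search_pos)
--         skip_idx = find_line_with_prefix(lines, f"SKIP LTP CASE {name} : ", search_pos)
--         next_run_idx = find_line_with_prefix(lines, "RUN LTP CASE ", search_pos)
--         terminal_candidates = [idx for idx in (fail_idx, skip_idx) if idx >= 0]
--         terminal_idx = min(terminal_candidates) if terminal_candidates else -1
--         if next_run_idx >= 0 and (terminal_idx < 0 or next_run_idx < terminal_idx):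
--             pos = next_run_idx
--             completed.append(name)
--             continue
--         if terminal_idx < 0:
--             return completed, name
--         pos = terminal_idx + 1
--         completed.append(name)
--     return completed, None
-- ===== SOURCE B (Python) =====
-- def ltp_shard_completed_and_stalled_cases(
--     lines: list[str],
--     cases: list[str],
-- ) -> tuple[list[str], str | None]:
--     # One combined early-exit forward scan per case instead of four full scans.
--     completed: list[str] = []
--     pos = 0
--     n = len(lines)
--     for name in cases:
--         target = f"RUN LTP CASE {name}"
--         i = pos
--         while i < n and lines[i] != target:
--             i += 1
--         if i == n:
--             break
--         fail = f"FAIL LTP CASE {name} : "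
--         skip = f"SKIP LTP CASE {name} : "
--         j = i + 1
--         while j < n:
--             line = lines[j]
--             if line.startswith("RUN LTP CASE "):
--                 pos = j
--                 break
--             if line.startswith(fail) or line.startswith(skip):
--                 pos = j + 1
--                 break
--             j += 1
--         else:
--             return completed, name
--         completed.append(name)
--     return completed, None
-- ===== Notes on version B (the rewrite author's own statement) =====
-- stated objective: alternative
-- what changed: Replaces the four separate scans per case (exact RUN match, FAIL prefix, SKIP prefix, next RUN prefix, each a standalone pass over the log tail) by one exact-match scan plus one combined early-exit scan that stops at the first line matching any of the three prefixes and decides the outcome from which pattern matched first.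
import Mathlib
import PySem

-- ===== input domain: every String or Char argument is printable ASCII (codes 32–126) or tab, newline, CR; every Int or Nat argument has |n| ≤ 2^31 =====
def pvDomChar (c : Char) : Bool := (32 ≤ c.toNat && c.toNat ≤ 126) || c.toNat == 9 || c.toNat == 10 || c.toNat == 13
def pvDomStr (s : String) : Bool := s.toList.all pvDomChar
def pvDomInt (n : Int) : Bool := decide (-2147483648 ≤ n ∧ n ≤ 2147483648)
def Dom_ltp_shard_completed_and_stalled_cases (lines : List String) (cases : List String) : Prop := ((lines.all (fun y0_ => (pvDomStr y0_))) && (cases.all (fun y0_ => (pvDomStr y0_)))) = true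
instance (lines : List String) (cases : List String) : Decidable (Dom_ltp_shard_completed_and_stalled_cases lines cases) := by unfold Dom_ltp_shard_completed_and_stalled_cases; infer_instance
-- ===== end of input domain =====

-- B replaces A's four separate scans per case by one exact-match scan plus one combined
-- early-exit scan that stops at the first line matching any of the three patterns
-- (alternative structure; same return value, proved below).

-- ===== PORT A =====
-- find_line_index: loop 'for index in range(start, len(lines))'; the index always lies
-- in range, so the .getD "" default of pyGet? is never the taken branch on these calls.
def pvFindIdxGo (lines : List String) (needle : String) : List Int → Int
  | [] => -1
  | i :: rest =>
    if ((PySem.List.pyGet? lines i).getD "") == needle then i else pvFindIdxGo lines needle rest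

def find_line_index (lines : List String) (needle : String) (start : Int) : Int :=
  pvFindIdxGo lines needle (PySem.List.pyRange start lines.length 1)

def pvFindPreGo (lines : List String) (prefixStr : String) : List Int → Int
  | [] => -1
  | i :: rest =>
    if PySem.Str.startswith ((PySem.List.pyGet? lines i).getD "") prefixStr then i
    else pvFindPreGo lines prefixStr rest

def find_line_with_prefix (lines : List String) (prefixStr : String) (start : Int) : Int :=
  pvFindPreGo lines prefixStr (PySem.List.pyRange start lines.length 1)

-- the 'for name in cases' loop of A, with completed/pos as loop state; break and the
-- in-loop 'return completed, name' become the two non-recursive results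
def pvALoop (lines : List String) : List String → List String → Int → List String × Option String
  | [], completed, _ => (completed, none)
  | name :: rest, completed, pos =>
    let run_idx := find_line_index lines ("RUN LTP CASE " ++ name) pos
    if run_idx < 0 then (completed, none)
    else
      let search_pos := run_idx + 1
      let fail_idx := find_line_with_prefix lines ("FAIL LTP CASE " ++ name ++ " : ") search_pos
      let skip_idx := find_line_with_prefix lines ("SKIP LTP CASE " ++ name ++ " : ") search_pos
      let next_run_idx := find_line_with_prefix lines "RUN LTP CASE " search_pos
      let terminal_candidates := [fail_idx, skip_idx].filter (fun idx => 0 ≤ idx)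
      let terminal_idx :=
        if terminal_candidates ≠ [] then
          (PySem.List.min? terminal_candidates (fun x => x)).getD (-1)
        else -1
      if 0 ≤ next_run_idx ∧ (terminal_idx < 0 ∨ next_run_idx < terminal_idx) then
        pvALoop lines rest (completed ++ [name]) next_run_idx
      else if terminal_idx < 0 then (completed, some name)
      else pvALoop lines rest (completed ++ [name]) (terminal_idx + 1)

def ltp_shard_completed_and_stalled_cases (lines : List String) (cases : List String) : List String × Option String :=
  pvALoop lines cases [] 0

-- ===== PORT B =====
-- 'i = pos; while i < n and lines[i] != target: i += 1'; returns n when not found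
def pvRunScan (lines : List String) (target : String) (i : Nat) : Nat :=
  if h : i < lines.length then
    if lines[i] != target then pvRunScan lines target (i + 1) else i
  else i
termination_by lines.length - i

-- the combined 'while j < n' scan; some pos' = break with new pos, none = while-else (stalled)
def pvCombScan (lines : List String) (fail skip : String) (j : Nat) : Option Nat :=
  if h : j < lines.length then
    let line := lines[j]
    if PySem.Str.startswith line "RUN LTP CASE " then some j
    else if PySem.Str.startswith line fail || PySem.Str.startswith line skip then some (j + 1)
    else pvCombScan lines fail skip (j + 1)
  else none
termination_by lines.length - j

def pvBLoop (lines : List String) : List String → List String → Nat → List String × Option String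
  | [], completed, _ => (completed, none)
  | name :: rest, completed, pos =>
    let i := pvRunScan lines ("RUN LTP CASE " ++ name) pos
    if i = lines.length then (completed, none)
    else
      match pvCombScan lines ("FAIL LTP CASE " ++ name ++ " : ") ("SKIP LTP CASE " ++ name ++ " : ") (i + 1) with
      | none => (completed, some name)
      | some p => pvBLoop lines rest (completed ++ [name]) p

def ltp_shard_completed_and_stalled_cases_alt (lines : List String) (cases : List String) : List String × Option String :=
  pvBLoop lines cases [] 0

-- ===== PRECONDITION & SPEC =====
def Spec_ltp_shard_completed_and_stalled_cases (lines : List String) (cases : List String) (out : List String × Option String) : Prop := out = ltp_shard_completed_and_stalled_cases_alt lines cases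
instance (lines : List String) (cases : List String) (out : List String × Option String) : Decidable (Spec_ltp_shard_completed_and_stalled_cases lines cases out) := by unfold Spec_ltp_shard_completed_and_stalled_cases; infer_instance

-- ===== CLAIM (what is proved, stated in full; the proofs are below) =====
def Claim_equal_ltp_shard_completed_and_stalled_cases : Prop := ∀ (lines : List String) (cases : List String), Dom_ltp_shard_completed_and_stalled_cases lines cases → Spec_ltp_shard_completed_and_stalled_cases lines cases (ltp_shard_completed_and_stalled_cases lines cases)

-- ===== LEMMAS AND PROOFS =====

-- proof-side spec: first index ≥ i whose line starts with p, or lines.length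
def pvFirstPre (lines : List String) (p : String) (i : Nat) : Nat :=
  if h : i < lines.length then
    if PySem.Str.startswith lines[i] p then i else pvFirstPre lines p (i + 1)
  else i
termination_by lines.length - i

lemma pvRunScan_ge (lines : List String) (t : String) (i : Nat) : i ≤ pvRunScan lines t i := by
  unfold pvRunScan
  split
  · split
    · exact le_trans (Nat.le_succ i) (pvRunScan_ge lines t (i + 1))
    · exact le_refl i
  · exact le_refl i
termination_by lines.length - i

lemma pvFirstPre_ge (lines : List String) (p : String) (i : Nat) : i ≤ pvFirstPre lines p i := by
  unfold pvFirstPre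
  split
  · split
    · exact le_refl i
    · exact le_trans (Nat.le_succ i) (pvFirstPre_ge lines p (i + 1))
  · exact le_refl i
termination_by lines.length - i

lemma pvRunScan_le (lines : List String) (t : String) (i : Nat) (h : i ≤ lines.length) :
    pvRunScan lines t i ≤ lines.length := by
  unfold pvRunScan
  split
  · split
    · exact pvRunScan_le lines t (i + 1) (by omega)
    · omega
  · exact h
termination_by lines.length - i

lemma pvFirstPre_le (lines : List String) (p : String) (i : Nat) (h : i ≤ lines.length) :
    pvFirstPre lines p i ≤ lines.length := by
  unfold pvFirstPre
  split
  · split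
    · omega
    · exact pvFirstPre_le lines p (i + 1) (by omega)
  · exact h
termination_by lines.length - i

-- A's find_line_index agrees with B's exact scan
lemma find_line_index_eq (lines : List String) (needle : String) (s : Nat) :
    find_line_index lines needle (s : Int) =
      (if pvRunScan lines needle s < lines.length then ((pvRunScan lines needle s : Nat) : Int) else -1) := by
  unfold find_line_index
  by_cases h : s < lines.length
  · rw [show ((lines.length : Int)) = ((lines.length : Nat) : Int) from rfl] at *
    rw [PySem.List.pyRange_one_cons (by exact_mod_cast h)]
    unfold pvFindIdxGo
    simp only [PySem.List.pyGet?_natCast, List.getElem?_eq_getElem h, Option.getD_some]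
    unfold pvRunScan
    simp only [h, dif_pos, bne]
    by_cases he : lines[s] == needle
    · simp [he, h]
    · simp only [he, Bool.not_false, if_true]
      have := find_line_index_eq lines needle (s + 1)
      unfold find_line_index at this
      rw [show ((s : Int) + 1) = (((s + 1 : Nat)) : Int) by push_cast; ring]
      exact this
  · rw [PySem.List.pyRange_one_eq_nil (by exact_mod_cast Nat.le_of_not_lt h)]
    unfold pvFindIdxGo pvRunScan
    simp [h]
termination_by lines.length - s

-- A's find_line_with_prefix agrees with the first-prefix-match scan
lemma find_line_with_prefix_eq (lines : List String) (p : String) (s : Nat) :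
    find_line_with_prefix lines p (s : Int) =
      (if pvFirstPre lines p s < lines.length then ((pvFirstPre lines p s : Nat) : Int) else -1) := by
  unfold find_line_with_prefix
  by_cases h : s < lines.length
  · rw [PySem.List.pyRange_one_cons (by exact_mod_cast h)]
    unfold pvFindPreGo
    simp only [PySem.List.pyGet?_natCast, List.getElem?_eq_getElem h, Option.getD_some]
    unfold pvFirstPre
    simp only [h, dif_pos, PySem.Str.startswith_eq]
    by_cases hs : PySem.Chars.startswith lines[s].toList p.toList = true
    · simp [hs, h]
    · simp only [hs, if_false, Bool.false_eq_true]
      have := find_line_with_prefix_eq lines p (s + 1)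
      unfold find_line_with_prefix at this
      rw [show ((s : Int) + 1) = (((s + 1 : Nat)) : Int) by push_cast; ring]
      simpa [PySem.Str.startswith_eq, hs] using this
  · rw [PySem.List.pyRange_one_eq_nil (by exact_mod_cast Nat.le_of_not_lt h)]
    unfold pvFindPreGo pvFirstPre
    simp [h]
termination_by lines.length - s

lemma head_of_startswith (l p : String) (c : Char)
    (h : PySem.Str.startswith l p = true) (hp : p.toList.head? = some c) :
    l.toList.head? = some c := by
  rw [PySem.Str.startswith_eq, PySem.Chars.startswith_iff] at h
  obtain ⟨t, ht⟩ := h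
  rw [← ht]
  cases hpl : p.toList with
  | nil => rw [hpl] at hp; simp at hp
  | cons x xs =>
    rw [hpl] at hp
    simp only [List.head?_cons, Option.some.injEq] at hp
    simp [hp]

lemma fail_head (name : String) :
    ("FAIL LTP CASE " ++ name ++ " : ").toList.head? = some 'F' := by
  have : ("FAIL LTP CASE " ++ name ++ " : ").toList
      = "FAIL LTP CASE ".toList ++ (name.toList ++ " : ".toList) := by
    simp [String.toList_append]
  rw [this]
  rfl

lemma skip_head (name : String) :
    ("SKIP LTP CASE " ++ name ++ " : ").toList.head? = some 'S' := by
  have : ("SKIP LTP CASE " ++ name ++ " : ").toList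
      = "SKIP LTP CASE ".toList ++ (name.toList ++ " : ".toList) := by
    simp [String.toList_append]
  rw [this]
  rfl

lemma run_not_fail (l name : String)
    (h : PySem.Str.startswith l "RUN LTP CASE " = true) :
    PySem.Str.startswith l ("FAIL LTP CASE " ++ name ++ " : ") = false := by
  by_contra hc
  rw [Bool.not_eq_false] at hc
  have h1 := head_of_startswith l _ 'R' h (by rfl)
  have h2 := head_of_startswith l _ 'F' hc (fail_head name)
  rw [h1] at h2
  simp at h2

lemma run_not_skip (l name : String)
    (h : PySem.Str.startswith l "RUN LTP CASE " = true) :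
    PySem.Str.startswith l ("SKIP LTP CASE " ++ name ++ " : ") = false := by
  by_contra hc
  rw [Bool.not_eq_false] at hc
  have h1 := head_of_startswith l _ 'R' h (by rfl)
  have h2 := head_of_startswith l _ 'S' hc (skip_head name)
  rw [h1] at h2
  simp at h2

-- characterization of the combined scan by the three single-prefix scans
lemma pvCombScan_eq (lines : List String) (name : String) (j : Nat) :
    pvCombScan lines ("FAIL LTP CASE " ++ name ++ " : ") ("SKIP LTP CASE " ++ name ++ " : ") j =
      (let R := pvFirstPre lines "RUN LTP CASE " j
       let F := pvFirstPre lines ("FAIL LTP CASE " ++ name ++ " : ") j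
       let S := pvFirstPre lines ("SKIP LTP CASE " ++ name ++ " : ") j
       if R < lines.length ∧ R < F ∧ R < S then some R
       else if min F S < lines.length then some (min F S + 1)
       else none) := by
  simp only []
  by_cases h : j < lines.length
  · unfold pvCombScan pvFirstPre
    simp only [h, dif_pos]
    by_cases hr : PySem.Str.startswith lines[j] "RUN LTP CASE "
    · have hf := run_not_fail lines[j] name hr
      have hs := run_not_skip lines[j] name hr
      have hF := pvFirstPre_ge lines ("FAIL LTP CASE " ++ name ++ " : ") (j + 1)
      have hS := pvFirstPre_ge lines ("SKIP LTP CASE " ++ name ++ " : ") (j + 1)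
      simp only [hr, hf, hs, if_true, Bool.false_eq_true, if_false]
      rw [if_pos ⟨h, by omega, by omega⟩]
    · by_cases hf : PySem.Str.startswith lines[j] ("FAIL LTP CASE " ++ name ++ " : ")
      · have hR := pvFirstPre_ge lines "RUN LTP CASE " (j + 1)
        have hS := pvFirstPre_ge lines ("SKIP LTP CASE " ++ name ++ " : ") (j + 1)
        simp only [hr, hf, Bool.false_eq_true, if_false, if_true, Bool.true_or]
        rw [if_neg (by intro ⟨_, h2, _⟩; omega)]
        by_cases hs : PySem.Str.startswith lines[j] ("SKIP LTP CASE " ++ name ++ " : ")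
        · simp only [hs, if_true, Nat.min_self]
          rw [if_pos h]
        · simp only [hs, Bool.false_eq_true, if_false]
          rw [if_pos (by omega)]
          congr 1
          omega
      · by_cases hs : PySem.Str.startswith lines[j] ("SKIP LTP CASE " ++ name ++ " : ")
        · have hR := pvFirstPre_ge lines "RUN LTP CASE " (j + 1)
          have hF := pvFirstPre_ge lines ("FAIL LTP CASE " ++ name ++ " : ") (j + 1)
          simp only [hr, hf, hs, Bool.false_eq_true, if_false, if_true, Bool.or_true]
          rw [if_neg (by intro ⟨_, h2, h3⟩; omega)]
          rw [if_pos (by omega)]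
          congr 1
          omega
        · simp only [hr, hf, hs, Bool.false_eq_true, if_false, Bool.or_self]
          exact pvCombScan_eq lines name (j + 1)
  · unfold pvCombScan pvFirstPre
    simp only [h, dif_neg, not_false_iff]
    rw [if_neg (by intro ⟨h1, _⟩; omega)]
    rw [if_neg (by omega)]
termination_by lines.length - j

-- the terminal_candidates / terminal_idx computation collapses to a min of the two scans
lemma terminal_char (F S len : Nat) :
    (if (List.filter (fun idx => decide ((0:Int) ≤ idx))
        [if F < len then ((F : Nat) : Int) else -1,
         if S < len then ((S : Nat) : Int) else -1]) ≠ [] then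
      (PySem.List.min? (List.filter (fun idx => decide ((0:Int) ≤ idx))
        [if F < len then ((F : Nat) : Int) else -1,
         if S < len then ((S : Nat) : Int) else -1]) (fun x => x)).getD (-1)
     else -1)
    = (if min F S < len then ((min F S : Nat) : Int) else -1) := by
  by_cases hF : F < len <;> by_cases hS : S < len
  · simp only [if_pos hF, if_pos hS]
    have hfil : List.filter (fun idx => decide ((0:Int) ≤ idx))
        [((F : Nat) : Int), ((S : Nat) : Int)] = [((F : Nat) : Int), ((S : Nat) : Int)] := by
      simp [List.filter]
    rw [hfil]
    have hne : ([((F : Nat) : Int), ((S : Nat) : Int)] : List Int) ≠ [] := by simp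
    rw [if_pos hne, PySem.List.min?_id_cons]
    simp only [List.foldl, Option.getD_some]
    rw [if_pos (by omega)]
    omega
  · simp only [if_pos hF, if_neg hS]
    have hfil : List.filter (fun idx => decide ((0:Int) ≤ idx))
        [((F : Nat) : Int), (-1 : Int)] = [((F : Nat) : Int)] := by
      simp [List.filter]
    rw [hfil]
    have hne : ([((F : Nat) : Int)] : List Int) ≠ [] := by simp
    rw [if_pos hne, PySem.List.min?_id_cons]
    simp only [List.foldl, Option.getD_some]
    rw [if_pos (by omega)]
    omega
  · simp only [if_neg hF, if_pos hS]
    have hfil : List.filter (fun idx => decide ((0:Int) ≤ idx))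
        [(-1 : Int), ((S : Nat) : Int)] = [((S : Nat) : Int)] := by
      simp [List.filter]
    rw [hfil]
    have hne : ([((S : Nat) : Int)] : List Int) ≠ [] := by simp
    rw [if_pos hne, PySem.List.min?_id_cons]
    simp only [List.foldl, Option.getD_some]
    rw [if_pos (by omega)]
    omega
  · simp only [if_neg hF, if_neg hS]
    have hfil : List.filter (fun idx => decide ((0:Int) ≤ idx))
        [(-1 : Int), (-1 : Int)] = ([] : List Int) := by
      simp [List.filter]
    rw [hfil]
    simp only [ne_eq, not_true_eq_false, if_false]
    rw [if_neg (by omega)]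

-- main loop equivalence, pos tracked as the Nat p on both sides
lemma pvLoop_eq (lines : List String) (cases : List String) :
    ∀ (completed : List String) (p : Nat), p ≤ lines.length →
      pvALoop lines cases completed (p : Int) = pvBLoop lines cases completed p := by
  induction cases with
  | nil => intro completed p _; rfl
  | cons name rest ih =>
    intro completed p hp
    unfold pvALoop pvBLoop
    rw [find_line_index_eq]
    set i := pvRunScan lines ("RUN LTP CASE " ++ name) p with hi
    have hile : i ≤ lines.length := pvRunScan_le _ _ _ hp
    by_cases h : i < lines.length
    · have hne : ¬ (i = lines.length) := by omega
      rw [if_pos h, if_neg hne]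
      have hnn : ¬ (((i : Nat) : Int) < 0) := by omega
      rw [if_neg hnn]
      have hcast : ((i : Int) + 1) = (((i + 1 : Nat)) : Int) := by push_cast; ring
      rw [hcast]
      simp only [find_line_with_prefix_eq, pvCombScan_eq, terminal_char]
      set F := pvFirstPre lines ("FAIL LTP CASE " ++ name ++ " : ") (i + 1) with hF
      set S := pvFirstPre lines ("SKIP LTP CASE " ++ name ++ " : ") (i + 1) with hS
      set R := pvFirstPre lines "RUN LTP CASE " (i + 1) with hR
      have hRle : R ≤ lines.length := pvFirstPre_le _ _ _ (by omega)
      by_cases hRlt : R < lines.length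
      · rw [if_pos hRlt]
        by_cases hT : min F S < lines.length
        · rw [if_pos hT]
          by_cases hRT : R < min F S
          · have hA1 : (0 ≤ ((R : Nat) : Int) ∧
                (((min F S : Nat) : Int) < 0 ∨ ((R : Nat) : Int) < ((min F S : Nat) : Int))) :=
              ⟨by omega, Or.inr (by exact_mod_cast hRT)⟩
            rw [if_pos hA1, if_pos ⟨hRlt, Nat.lt_min.mp hRT⟩]
            exact ih _ R hRle
          · have hA1 : ¬ (0 ≤ ((R : Nat) : Int) ∧
                (((min F S : Nat) : Int) < 0 ∨ ((R : Nat) : Int) < ((min F S : Nat) : Int))) := by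
              intro ⟨_, hor⟩
              rcases hor with h1 | h1
              · omega
              · exact hRT (by exact_mod_cast h1)
            have hB1 : ¬ (R < lines.length ∧ R < F ∧ R < S) := by
              intro ⟨_, h2, h3⟩
              exact hRT (Nat.lt_min.mpr ⟨h2, h3⟩)
            rw [if_neg hA1, if_neg hB1, if_pos hT,
              if_neg (show ¬ (((min F S : Nat) : Int) < 0) by omega)]
            rw [show ((min F S : Nat) : Int) + 1 = (((min F S + 1 : Nat)) : Int) by push_cast; ring]
            exact ih _ (min F S + 1) (by omega)
        · rw [if_neg hT]
          have hRT : R < min F S := by omega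
          have hA1 : (0 ≤ ((R : Nat) : Int) ∧
              ((-1 : Int) < 0 ∨ ((R : Nat) : Int) < (-1 : Int))) :=
            ⟨by omega, Or.inl (by norm_num)⟩
          rw [if_pos hA1, if_pos ⟨hRlt, Nat.lt_min.mp hRT⟩]
          exact ih _ R hRle
      · rw [if_neg hRlt]
        have hA1 : ¬ ((0 : Int) ≤ -1 ∧
            ((if min F S < lines.length then ((min F S : Nat) : Int) else -1) < 0 ∨
              (-1 : Int) < (if min F S < lines.length then ((min F S : Nat) : Int) else -1))) := by
          intro ⟨h1, _⟩
          norm_num at h1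
        have hB1 : ¬ (R < lines.length ∧ R < F ∧ R < S) := by
          intro ⟨h1, _⟩
          exact hRlt h1
        rw [if_neg hA1, if_neg hB1]
        by_cases hT : min F S < lines.length
        · rw [if_pos hT, if_pos hT,
            if_neg (show ¬ (((min F S : Nat) : Int) < 0) by omega)]
          rw [show ((min F S : Nat) : Int) + 1 = (((min F S + 1 : Nat)) : Int) by push_cast; ring]
          exact ih _ (min F S + 1) (by omega)
        · rw [if_neg hT, if_neg hT, if_pos (show (-1 : Int) < 0 by norm_num)]
    · have hieq : i = lines.length := by omega
      rw [if_neg h, if_pos hieq, if_pos (show (-1 : Int) < 0 by norm_num)]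

-- ===== VERDICT (by name: the statement is the Claim_ definition above) =====
theorem ltp_shard_completed_and_stalled_cases_spec : Claim_equal_ltp_shard_completed_and_stalled_cases := by
  intro lines cases _
  unfold Spec_ltp_shard_completed_and_stalled_cases
  unfold ltp_shard_completed_and_stalled_cases ltp_shard_completed_and_stalled_cases_alt
  exact_mod_cast pvLoop_eq lines cases [] 0 (Nat.zero_le _)
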